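-- pv_equiv track=rewrite | github.com/Pharaohleft/exp-decision-platform | src/stats/funnel.py | _order_steps
-- ===== SOURCE A (Python) =====
-- from typing import Any, Dict, List
--
-- _ORDER_HINTS = [
--     ("viewed","view","impression","seen"),
--     ("clicked","click","tap"),
--     ("add_to_cart","added_to_cart","atc"),
--     ("checkout","checked_out"),
--     ("purchase","purchased","ordered","converted"),  # final
-- ]
--
-- def _order_steps(cols: List[str]) -> List[str]:
--     assigned = set()
--     ordered = []
--     # use hints first
--     for group in _ORDER_HINTS:
--         for name in group:
--             for c in cols:
--                 if c.lower() == name and c not in assigned: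
--                     ordered.append(c); assigned.add(c); break
--             if ordered and ordered[-1].lower() == name:
--                 break
--     # add any remaining binary cols alphabetically
--     for c in sorted(cols):
--         if c not in assigned:
--             ordered.append(c)
--     return ordered
-- ===== SOURCE B (Python) =====
-- from typing import List
--
-- _ORDER_HINTS = [
--     ("viewed","view","impression","seen"),
--     ("clicked","click","tap"),
--     ("add_to_cart","added_to_cart","atc"),
--     ("checkout","checked_out"),
--     ("purchase","purchased","ordered","converted"),  # final
-- ]
--
-- def _group_of(k):
--     # which hint group (and which name in it) a lowercase value belongs to
--     for gi, group in enumerate(_ORDER_HINTS):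
--         if k in group:
--             return gi, group.index(k)
--     return None
--
-- def _order_steps(cols: List[str]) -> List[str]:
--     # single pass over the columns: keep, per group, the candidate with the
--     # smallest (name index, position) key
--     best = {}
--     for i, c in enumerate(cols):
--         r = _group_of(c.lower())
--         if r is not None:
--             gi, ni = r
--             key = (ni, i)
--             if gi not in best or key < best[gi][0]:
--                 best[gi] = (key, c)
--     chosen = [best[gi][1] for gi in range(len(_ORDER_HINTS)) if gi in best]
--     taken = set(chosen)
--     return chosen + [c for c in sorted(cols) if c not in taken]
-- ===== Notes on version B (the rewrite author's own statement) =====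
-- stated objective: alternative
-- what changed: A iterates hint names (group by group) and rescans cols for each name with early breaks; B makes a single pass over enumerate(cols), classifying each column once and keeping per hint group the running minimum by (name index, position), then emits the per-group winners in group order and the unpicked columns sorted.
import Mathlib
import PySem

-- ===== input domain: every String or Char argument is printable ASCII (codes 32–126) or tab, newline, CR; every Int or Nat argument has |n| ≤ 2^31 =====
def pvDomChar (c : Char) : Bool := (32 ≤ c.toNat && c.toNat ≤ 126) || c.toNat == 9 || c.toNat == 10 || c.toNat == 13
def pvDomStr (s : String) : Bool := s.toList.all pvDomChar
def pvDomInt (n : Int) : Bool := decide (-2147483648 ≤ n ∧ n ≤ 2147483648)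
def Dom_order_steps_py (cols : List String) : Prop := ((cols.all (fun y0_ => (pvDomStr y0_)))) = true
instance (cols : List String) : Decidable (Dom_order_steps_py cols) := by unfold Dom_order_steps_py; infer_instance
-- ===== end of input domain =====

-- B replaces A's nested hint-name loops (each scanning cols with early breaks) by a
-- single pass over the columns keeping, per hint group, the argmin by (name index,
-- position); objective: alternative decomposition, same observable result.

-- _ORDER_HINTS (module constant, shared by both Pythons)
def pvHints : List (List String) :=
  [["viewed","view","impression","seen"],
   ["clicked","click","tap"],
   ["add_to_cart","added_to_cart","atc"],
   ["checkout","checked_out"],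
   ["purchase","purchased","ordered","converted"]]

-- ===== PORT A =====
-- inner 'for c in cols: … break' → find?; 'for name in group' → structural recursion
def pvGroupA (cols : List String) :
    List String → List String × PySem.Set String → List String × PySem.Set String
  | [], st => st
  | name :: rest, (ordered, assigned) =>
      let st :=
        match cols.find? (fun c => PySem.Str.lower c == name && !(PySem.Set.contains assigned c)) with
        | some c => (ordered ++ [c], PySem.Set.add assigned c)
        | none => (ordered, assigned)
      -- 'if ordered and ordered[-1].lower() == name: break'
      if (match st.1.getLast? with
          | some l => PySem.Str.lower l == name
          | none => false) then st
      else pvGroupA cols rest st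

def order_steps_py (cols : List String) : List String :=
  let st := pvHints.foldl (fun st group => pvGroupA cols group st) ([], PySem.Set.empty)
  (PySem.List.sorted cols (fun x => x) false).foldl
    (fun ordered c => if !(PySem.Set.contains st.2 c) then ordered ++ [c] else ordered) st.1

-- ===== PORT B =====
-- _group_of: 'for gi, group in enumerate(_ORDER_HINTS): if k in group: return gi, group.index(k)'
def pvGroupOf : List (List String) → Int → String → Option (Int × Int)
  | [], _, _ => none
  | g :: gs, gi, k =>
      if g.contains k then (PySem.List.index? g k).map (fun (ni : Nat) => (gi, (ni : Int)))
      else pvGroupOf gs (gi + 1) k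

-- Python tuple comparison (ni, i) < (nj, j)
def pvKeyLt (a b : Int × Int) : Bool := a.1 < b.1 || (a.1 == b.1 && a.2 < b.2)

-- loop body of 'for i, c in enumerate(cols): …'
def pvStep (best : PySem.Dict Int ((Int × Int) × String)) (p : Int × String) :
    PySem.Dict Int ((Int × Int) × String) :=
  match pvGroupOf pvHints 0 (PySem.Str.lower p.2) with
  | none => best
  | some (gi, ni) =>
      match PySem.Dict.get? best gi with
      | none => PySem.Dict.insert best gi ((ni, p.1), p.2)
      | some cur =>
          if pvKeyLt (ni, p.1) cur.1 then PySem.Dict.insert best gi ((ni, p.1), p.2) else best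

def order_steps_py_alt (cols : List String) : List String :=
  let best := (PySem.List.enumerate cols 0).foldl pvStep PySem.Dict.empty
  let chosen := (PySem.List.pyRange 0 (pvHints.length : Int) 1).foldl
    (fun acc gi => match PySem.Dict.get? best gi with
      | some v => acc ++ [v.2]
      | none => acc) []
  let taken := PySem.Set.ofList chosen
  chosen ++ (PySem.List.sorted cols (fun x => x) false).filter (fun c => !(PySem.Set.contains taken c))

-- ===== PRECONDITION & SPEC =====
def Spec_order_steps_py (cols : List String) (out : List String) : Prop := out = order_steps_py_alt cols
instance (cols : List String) (out : List String) : Decidable (Spec_order_steps_py cols out) := by unfold Spec_order_steps_py; infer_instance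

-- ===== CLAIM (what is proved, stated in full; the proofs are below) =====
def Claim_equal_order_steps_py : Prop := ∀ (cols : List String), Dom_order_steps_py cols → Spec_order_steps_py cols (order_steps_py cols)

-- ===== LEMMAS AND PROOFS =====

-- the common intermediate: the pick of a group = first name having a match in cols
def pvSpecPick (cols : List String) : List String → Option String
  | [] => none
  | name :: rest =>
      match cols.find? (fun c => PySem.Str.lower c == name) with
      | some c => some c
      | none => pvSpecPick cols rest

-- ---------- A-side characterisation ----------

theorem pvGroupA_spec (cols : List String) (g : List String) (ordered : List String)
    (assigned : PySem.Set String)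
    (hA : ∀ a ∈ assigned, ∀ n ∈ g, PySem.Str.lower a ≠ n)
    (hL : ∀ l, ordered.getLast? = some l → ∀ n ∈ g, PySem.Str.lower l ≠ n) :
    pvGroupA cols g (ordered, assigned) =
      match pvSpecPick cols g with
      | some c => (ordered ++ [c], PySem.Set.add assigned c)
      | none => (ordered, assigned) := by
  induction g with
  | nil => rfl
  | cons name rest ih =>
    have hpq : (fun c => PySem.Str.lower c == name && !(PySem.Set.contains assigned c))
        = (fun c => PySem.Str.lower c == name) := by
      funext c
      by_cases h : PySem.Str.lower c = name
      · have hc : PySem.Set.contains assigned c = false := by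
          rw [← Bool.not_eq_true, PySem.Set.contains_iff]
          intro hm
          exact hA c hm name List.mem_cons_self h
        simp only [hc, Bool.not_false, Bool.and_true]
      · have hb : (PySem.Str.lower c == name) = false := beq_eq_false_iff_ne.mpr h
        simp [hb]
    rw [pvGroupA, pvSpecPick, hpq]
    cases h : cols.find? (fun c => PySem.Str.lower c == name) with
    | some c =>
      have hc : (PySem.Str.lower c == name) = true := by
        have hp := List.find?_some h
        simpa using hp
      simp [hc]
    | none =>
      have hbreak : (match ordered.getLast? with
          | some l => PySem.Str.lower l == name
          | none => false) = false := by
        cases hl : ordered.getLast? with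
        | some l => exact beq_eq_false_iff_ne.mpr (hL l hl name List.mem_cons_self)
        | none => rfl
      rw [hbreak]
      simp only [Bool.false_eq_true, if_false]
      exact ih (fun a ha n hn => hA a ha n (List.mem_cons_of_mem _ hn))
        (fun l hl n hn => hL l hl n (List.mem_cons_of_mem _ hn))

theorem pvSpecPick_lower (cols : List String) : ∀ (g : List String) (c : String),
    pvSpecPick cols g = some c → PySem.Str.lower c ∈ g := by
  intro g
  induction g with
  | nil => intro c h; simp [pvSpecPick] at h
  | cons name rest ih =>
    intro c h
    rw [pvSpecPick] at h
    cases hf : cols.find? (fun x => PySem.Str.lower x == name) with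
    | some c' =>
      rw [hf] at h
      cases h
      have hc : PySem.Str.lower c = name := by
        have hp := List.find?_some hf
        simpa using hp
      rw [hc]
      exact List.mem_cons_self
    | none =>
      rw [hf] at h
      exact List.mem_cons_of_mem _ (ih c h)

theorem pvFold_spec (cols : List String) : ∀ (groups : List (List String))
    (ordered : List String) (assigned : PySem.Set String),
    (∀ a, a ∈ assigned ↔ a ∈ ordered) →
    (∀ a ∈ ordered, ∀ n ∈ groups.flatten, PySem.Str.lower a ≠ n) →
    groups.flatten.Nodup →
    (groups.foldl (fun st group => pvGroupA cols group st) (ordered, assigned)).1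
      = groups.foldl (fun ord group =>
          match pvSpecPick cols group with
          | some c => ord ++ [c]
          | none => ord) ordered
    ∧ ∀ a, a ∈ (groups.foldl (fun st group => pvGroupA cols group st) (ordered, assigned)).2
        ↔ a ∈ groups.foldl (fun ord group =>
            match pvSpecPick cols group with
            | some c => ord ++ [c]
            | none => ord) ordered := by
  intro groups
  induction groups with
  | nil => intro ordered assigned hcup hmem hnd; exact ⟨rfl, hcup⟩
  | cons g rest ih =>
    intro ordered assigned hcup hmem hnd
    rw [List.flatten_cons] at hmem hnd
    rw [List.foldl_cons, List.foldl_cons,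
      pvGroupA_spec cols g ordered assigned
        (fun a ha n hn => hmem a ((hcup a).mp ha) n (List.mem_append_left _ hn))
        (fun l hl n hn => hmem l (List.mem_of_getLast? hl) n (List.mem_append_left _ hn))]
    rw [List.nodup_append] at hnd
    cases h : pvSpecPick cols g with
    | some c =>
      have hcg : PySem.Str.lower c ∈ g := pvSpecPick_lower cols g c h
      refine ih (ordered ++ [c]) (PySem.Set.add assigned c) ?_ ?_ hnd.2.1
      · intro a
        rw [PySem.Set.mem_add, List.mem_append, List.mem_singleton, hcup a]
      · intro a ha n hn
        rcases List.mem_append.mp ha with ha | ha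
        · exact hmem a ha n (List.mem_append_right _ hn)
        · rw [List.mem_singleton] at ha
          subst ha
          exact hnd.2.2 _ hcg n hn
    | none =>
      exact ih ordered assigned hcup
        (fun a ha n hn => hmem a ha n (List.mem_append_right _ hn)) hnd.2.1

-- ---------- B-side characterisation ----------

-- min with left preference (earlier candidate wins ties), exactly the update rule of pvStep
def pvMerge (x y : Option ((Int × Int) × String)) : Option ((Int × Int) × String) :=
  match x, y with
  | none, y => y
  | some a, none => some a
  | some a, some b => if pvKeyLt b.1 a.1 then some b else some a

def pvCand (gi : Int) (p : Int × String) : Option ((Int × Int) × String) :=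
  match pvGroupOf pvHints 0 (PySem.Str.lower p.2) with
  | some (gi', ni) => if gi' = gi then some ((ni, p.1), p.2) else none
  | none => none

def pvBestC (gi : Int) : List (Int × String) → Option ((Int × Int) × String)
  | [] => none
  | p :: ps => pvMerge (pvCand gi p) (pvBestC gi ps)

theorem pvKeyLt_trans {a b c : Int × Int} (h1 : pvKeyLt a b = true) (h2 : pvKeyLt b c = true) :
    pvKeyLt a c = true := by
  simp only [pvKeyLt, Bool.or_eq_true, Bool.and_eq_true, decide_eq_true_eq, beq_iff_eq] at *
  omega

theorem pvKeyLt_not_trans {a b c : Int × Int} (h1 : pvKeyLt b a = false) (h2 : pvKeyLt c b = false) :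
    pvKeyLt c a = false := by
  simp only [pvKeyLt, Bool.or_eq_false_iff, Bool.and_eq_false_iff,
    decide_eq_false_iff_not, beq_eq_false_iff_ne, ne_eq] at *
  omega

theorem pvMerge_assoc (x y z : Option ((Int × Int) × String)) :
    pvMerge (pvMerge x y) z = pvMerge x (pvMerge y z) := by
  rcases x with _ | a
  · rfl
  rcases y with _ | b
  · cases z <;> rfl
  rcases z with _ | c
  · simp only [pvMerge]; split_ifs <;> rfl
  by_cases h1 : pvKeyLt b.1 a.1 <;> by_cases h2 : pvKeyLt c.1 b.1
  · have h3 : pvKeyLt c.1 a.1 = true := pvKeyLt_trans h2 h1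
    simp [pvMerge, h1, h2, h3]
  · simp [pvMerge, h1, h2]
  · simp [pvMerge, h1, h2]
  · have h1' : pvKeyLt b.1 a.1 = false := by simpa using h1
    have h2' : pvKeyLt c.1 b.1 = false := by simpa using h2
    have h3 : pvKeyLt c.1 a.1 = false := pvKeyLt_not_trans h1' h2'
    simp [pvMerge, h1, h2, h3]

theorem pvStep_get (best : PySem.Dict Int ((Int × Int) × String)) (p : Int × String) (gi : Int) :
    PySem.Dict.get? (pvStep best p) gi = pvMerge (PySem.Dict.get? best gi) (pvCand gi p) := by
  rw [pvStep, pvCand]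
  cases hg : pvGroupOf pvHints 0 (PySem.Str.lower p.2) with
  | none => cases PySem.Dict.get? best gi <;> rfl
  | some r =>
    obtain ⟨gi', ni⟩ := r
    dsimp only
    by_cases hgi : gi' = gi
    · subst hgi
      cases hb : PySem.Dict.get? best gi' with
      | none =>
        rw [if_pos rfl]
        show PySem.Dict.get? (PySem.Dict.insert best gi' ((ni, p.1), p.2)) gi'
          = pvMerge none (some ((ni, p.1), p.2))
        rw [PySem.Dict.get?_insert_self]
        rfl
      | some cur =>
        rw [if_pos rfl]
        show PySem.Dict.get? (if pvKeyLt (ni, p.1) cur.1 = true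
            then PySem.Dict.insert best gi' ((ni, p.1), p.2) else best) gi'
          = pvMerge (some cur) (some ((ni, p.1), p.2))
        by_cases hlt : pvKeyLt (ni, p.1) cur.1
        · rw [if_pos hlt, PySem.Dict.get?_insert_self, pvMerge, if_pos hlt]
        · rw [if_neg hlt, pvMerge, if_neg hlt]; exact hb
    · rw [if_neg hgi]
      have hback : pvMerge (PySem.Dict.get? best gi) none = PySem.Dict.get? best gi := by
        cases PySem.Dict.get? best gi <;> rfl
      cases hb : PySem.Dict.get? best gi' with
      | none =>
        show PySem.Dict.get? (PySem.Dict.insert best gi' ((ni, p.1), p.2)) gi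
          = pvMerge (PySem.Dict.get? best gi) none
        rw [PySem.Dict.get?_insert_of_ne best _ (fun h => hgi h.symm), hback]
      | some cur =>
        show PySem.Dict.get? (if pvKeyLt (ni, p.1) cur.1 = true
            then PySem.Dict.insert best gi' ((ni, p.1), p.2) else best) gi
          = pvMerge (PySem.Dict.get? best gi) none
        by_cases hlt : pvKeyLt (ni, p.1) cur.1
        · rw [if_pos hlt, PySem.Dict.get?_insert_of_ne best _ (fun h => hgi h.symm), hback]
        · rw [if_neg hlt, hback]

theorem pvFoldB_get (gi : Int) : ∀ (ps : List (Int × String)) (best : PySem.Dict Int ((Int × Int) × String)),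
    PySem.Dict.get? (ps.foldl pvStep best) gi
      = pvMerge (PySem.Dict.get? best gi) (pvBestC gi ps) := by
  intro ps
  induction ps with
  | nil =>
    intro best
    rw [List.foldl_nil]
    cases PySem.Dict.get? best gi <;> rfl
  | cons p ps ih =>
    intro best
    rw [List.foldl_cons, ih, pvStep_get, pvBestC, pvMerge_assoc]

-- per-group candidate shape: project pvGroupOf at each literal group index
def pvCandG (g : List String) (p : Int × String) : Option ((Int × Int) × String) :=
  (PySem.List.index? g (PySem.Str.lower p.2)).map (fun (ni : Nat) => (((ni : Int), p.1), p.2))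

theorem pvGroupOf_ge : ∀ (gs : List (List String)) (gi0 : Int) (s : String) (gi' ni : Int),
    pvGroupOf gs gi0 s = some (gi', ni) → gi0 ≤ gi' := by
  intro gs
  induction gs with
  | nil => intro gi0 s gi' ni h; rw [pvGroupOf] at h; simp at h
  | cons g rest ih =>
    intro gi0 s gi' ni h
    rw [pvGroupOf] at h
    by_cases hc : g.contains s
    · rw [if_pos hc] at h
      cases hi : PySem.List.index? g s with
      | some k => rw [hi] at h; simp only [Option.map_some, Option.some_inj, Prod.mk.injEq] at h; omega
      | none => rw [hi] at h; simp at h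
    · rw [if_neg hc] at h
      have := ih (gi0 + 1) s gi' ni h
      omega

theorem pvCand_eq0 (p : Int × String) : pvCand (0 : Int) p = pvCandG ["viewed","view","impression","seen"] p := by
  rw [pvCand, pvCandG, pvHints, pvGroupOf]
  by_cases hK : (["viewed","view","impression","seen"] : List String).contains (PySem.Str.lower p.2)
  · rw [if_pos hK]
    cases hi : PySem.List.index? (["viewed","view","impression","seen"] : List String) (PySem.Str.lower p.2) with
    | some ni => norm_num
    | none => rfl
  · rw [if_neg hK]
    have hni : PySem.List.index? ["viewed","view","impression","seen"] (PySem.Str.lower p.2) = none := by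
      rw [PySem.List.index?_eq_none_iff]; simpa using hK
    rw [hni]
    cases hg : pvGroupOf ([["clicked","click","tap"],["add_to_cart","added_to_cart","atc"],["checkout","checked_out"],["purchase","purchased","ordered","converted"]] : List (List String)) (0 + 1) (PySem.Str.lower p.2) with
    | none => rfl
    | some r =>
      obtain ⟨gi0, ni0⟩ := r
      have hge := pvGroupOf_ge ([["clicked","click","tap"],["add_to_cart","added_to_cart","atc"],["checkout","checked_out"],["purchase","purchased","ordered","converted"]] : List (List String)) (0 + 1) (PySem.Str.lower p.2) gi0 ni0 hg
      have hne : gi0 ≠ (0 : Int) := by omega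
      show (if gi0 = (0 : Int) then some ((ni0, p.1), p.2) else none)
        = Option.map (fun (ni : Nat) => (((ni : Int), p.1), p.2)) none
      rw [if_neg hne]
      rfl

theorem pvCand_eq1 (p : Int × String) : pvCand (1 : Int) p = pvCandG ["clicked","click","tap"] p := by
  rw [pvCand, pvCandG, pvHints, pvGroupOf]
  by_cases h0 : (["viewed","view","impression","seen"] : List String).contains (PySem.Str.lower p.2)
  · rw [if_pos h0]
    have hni : PySem.List.index? ["clicked","click","tap"] (PySem.Str.lower p.2) = none := by
      rw [PySem.List.index?_eq_none_iff]
      have hm : PySem.Str.lower p.2 ∈ (["viewed","view","impression","seen"] : List String) := by simpa using h0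
      rcases (by simpa using hm : PySem.Str.lower p.2 = "viewed" ∨ PySem.Str.lower p.2 = "view" ∨ PySem.Str.lower p.2 = "impression" ∨ PySem.Str.lower p.2 = "seen") with h|h|h|h <;> rw [h] <;> decide
    rw [hni]
    cases hi : PySem.List.index? (["viewed","view","impression","seen"] : List String) (PySem.Str.lower p.2) with
    | some ni => norm_num
    | none => rfl
  rw [if_neg h0, pvGroupOf]
  by_cases hK : (["clicked","click","tap"] : List String).contains (PySem.Str.lower p.2)
  · rw [if_pos hK]
    cases hi : PySem.List.index? (["clicked","click","tap"] : List String) (PySem.Str.lower p.2) with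
    | some ni => norm_num
    | none => rfl
  · rw [if_neg hK]
    have hni : PySem.List.index? ["clicked","click","tap"] (PySem.Str.lower p.2) = none := by
      rw [PySem.List.index?_eq_none_iff]; simpa using hK
    rw [hni]
    cases hg : pvGroupOf ([["add_to_cart","added_to_cart","atc"],["checkout","checked_out"],["purchase","purchased","ordered","converted"]] : List (List String)) (0 + 1 + 1) (PySem.Str.lower p.2) with
    | none => rfl
    | some r =>
      obtain ⟨gi0, ni0⟩ := r
      have hge := pvGroupOf_ge ([["add_to_cart","added_to_cart","atc"],["checkout","checked_out"],["purchase","purchased","ordered","converted"]] : List (List String)) (0 + 1 + 1) (PySem.Str.lower p.2) gi0 ni0 hg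
      have hne : gi0 ≠ (1 : Int) := by omega
      show (if gi0 = (1 : Int) then some ((ni0, p.1), p.2) else none)
        = Option.map (fun (ni : Nat) => (((ni : Int), p.1), p.2)) none
      rw [if_neg hne]
      rfl

theorem pvCand_eq2 (p : Int × String) : pvCand (2 : Int) p = pvCandG ["add_to_cart","added_to_cart","atc"] p := by
  rw [pvCand, pvCandG, pvHints, pvGroupOf]
  by_cases h0 : (["viewed","view","impression","seen"] : List String).contains (PySem.Str.lower p.2)
  · rw [if_pos h0]
    have hni : PySem.List.index? ["add_to_cart","added_to_cart","atc"] (PySem.Str.lower p.2) = none := by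
      rw [PySem.List.index?_eq_none_iff]
      have hm : PySem.Str.lower p.2 ∈ (["viewed","view","impression","seen"] : List String) := by simpa using h0
      rcases (by simpa using hm : PySem.Str.lower p.2 = "viewed" ∨ PySem.Str.lower p.2 = "view" ∨ PySem.Str.lower p.2 = "impression" ∨ PySem.Str.lower p.2 = "seen") with h|h|h|h <;> rw [h] <;> decide
    rw [hni]
    cases hi : PySem.List.index? (["viewed","view","impression","seen"] : List String) (PySem.Str.lower p.2) with
    | some ni => norm_num
    | none => rfl
  rw [if_neg h0, pvGroupOf]
  by_cases h1 : (["clicked","click","tap"] : List String).contains (PySem.Str.lower p.2)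
  · rw [if_pos h1]
    have hni : PySem.List.index? ["add_to_cart","added_to_cart","atc"] (PySem.Str.lower p.2) = none := by
      rw [PySem.List.index?_eq_none_iff]
      have hm : PySem.Str.lower p.2 ∈ (["clicked","click","tap"] : List String) := by simpa using h1
      rcases (by simpa using hm : PySem.Str.lower p.2 = "clicked" ∨ PySem.Str.lower p.2 = "click" ∨ PySem.Str.lower p.2 = "tap") with h|h|h <;> rw [h] <;> decide
    rw [hni]
    cases hi : PySem.List.index? (["clicked","click","tap"] : List String) (PySem.Str.lower p.2) with
    | some ni => norm_num
    | none => rfl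
  rw [if_neg h1, pvGroupOf]
  by_cases hK : (["add_to_cart","added_to_cart","atc"] : List String).contains (PySem.Str.lower p.2)
  · rw [if_pos hK]
    cases hi : PySem.List.index? (["add_to_cart","added_to_cart","atc"] : List String) (PySem.Str.lower p.2) with
    | some ni => norm_num
    | none => rfl
  · rw [if_neg hK]
    have hni : PySem.List.index? ["add_to_cart","added_to_cart","atc"] (PySem.Str.lower p.2) = none := by
      rw [PySem.List.index?_eq_none_iff]; simpa using hK
    rw [hni]
    cases hg : pvGroupOf ([["checkout","checked_out"],["purchase","purchased","ordered","converted"]] : List (List String)) (0 + 1 + 1 + 1) (PySem.Str.lower p.2) with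
    | none => rfl
    | some r =>
      obtain ⟨gi0, ni0⟩ := r
      have hge := pvGroupOf_ge ([["checkout","checked_out"],["purchase","purchased","ordered","converted"]] : List (List String)) (0 + 1 + 1 + 1) (PySem.Str.lower p.2) gi0 ni0 hg
      have hne : gi0 ≠ (2 : Int) := by omega
      show (if gi0 = (2 : Int) then some ((ni0, p.1), p.2) else none)
        = Option.map (fun (ni : Nat) => (((ni : Int), p.1), p.2)) none
      rw [if_neg hne]
      rfl

theorem pvCand_eq3 (p : Int × String) : pvCand (3 : Int) p = pvCandG ["checkout","checked_out"] p := by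
  rw [pvCand, pvCandG, pvHints, pvGroupOf]
  by_cases h0 : (["viewed","view","impression","seen"] : List String).contains (PySem.Str.lower p.2)
  · rw [if_pos h0]
    have hni : PySem.List.index? ["checkout","checked_out"] (PySem.Str.lower p.2) = none := by
      rw [PySem.List.index?_eq_none_iff]
      have hm : PySem.Str.lower p.2 ∈ (["viewed","view","impression","seen"] : List String) := by simpa using h0
      rcases (by simpa using hm : PySem.Str.lower p.2 = "viewed" ∨ PySem.Str.lower p.2 = "view" ∨ PySem.Str.lower p.2 = "impression" ∨ PySem.Str.lower p.2 = "seen") with h|h|h|h <;> rw [h] <;> decide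
    rw [hni]
    cases hi : PySem.List.index? (["viewed","view","impression","seen"] : List String) (PySem.Str.lower p.2) with
    | some ni => norm_num
    | none => rfl
  rw [if_neg h0, pvGroupOf]
  by_cases h1 : (["clicked","click","tap"] : List String).contains (PySem.Str.lower p.2)
  · rw [if_pos h1]
    have hni : PySem.List.index? ["checkout","checked_out"] (PySem.Str.lower p.2) = none := by
      rw [PySem.List.index?_eq_none_iff]
      have hm : PySem.Str.lower p.2 ∈ (["clicked","click","tap"] : List String) := by simpa using h1
      rcases (by simpa using hm : PySem.Str.lower p.2 = "clicked" ∨ PySem.Str.lower p.2 = "click" ∨ PySem.Str.lower p.2 = "tap") with h|h|h <;> rw [h] <;> decide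
    rw [hni]
    cases hi : PySem.List.index? (["clicked","click","tap"] : List String) (PySem.Str.lower p.2) with
    | some ni => norm_num
    | none => rfl
  rw [if_neg h1, pvGroupOf]
  by_cases h2 : (["add_to_cart","added_to_cart","atc"] : List String).contains (PySem.Str.lower p.2)
  · rw [if_pos h2]
    have hni : PySem.List.index? ["checkout","checked_out"] (PySem.Str.lower p.2) = none := by
      rw [PySem.List.index?_eq_none_iff]
      have hm : PySem.Str.lower p.2 ∈ (["add_to_cart","added_to_cart","atc"] : List String) := by simpa using h2
      rcases (by simpa using hm : PySem.Str.lower p.2 = "add_to_cart" ∨ PySem.Str.lower p.2 = "added_to_cart" ∨ PySem.Str.lower p.2 = "atc") with h|h|h <;> rw [h] <;> decide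
    rw [hni]
    cases hi : PySem.List.index? (["add_to_cart","added_to_cart","atc"] : List String) (PySem.Str.lower p.2) with
    | some ni => norm_num
    | none => rfl
  rw [if_neg h2, pvGroupOf]
  by_cases hK : (["checkout","checked_out"] : List String).contains (PySem.Str.lower p.2)
  · rw [if_pos hK]
    cases hi : PySem.List.index? (["checkout","checked_out"] : List String) (PySem.Str.lower p.2) with
    | some ni => norm_num
    | none => rfl
  · rw [if_neg hK]
    have hni : PySem.List.index? ["checkout","checked_out"] (PySem.Str.lower p.2) = none := by
      rw [PySem.List.index?_eq_none_iff]; simpa using hK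
    rw [hni]
    cases hg : pvGroupOf ([["purchase","purchased","ordered","converted"]] : List (List String)) (0 + 1 + 1 + 1 + 1) (PySem.Str.lower p.2) with
    | none => rfl
    | some r =>
      obtain ⟨gi0, ni0⟩ := r
      have hge := pvGroupOf_ge ([["purchase","purchased","ordered","converted"]] : List (List String)) (0 + 1 + 1 + 1 + 1) (PySem.Str.lower p.2) gi0 ni0 hg
      have hne : gi0 ≠ (3 : Int) := by omega
      show (if gi0 = (3 : Int) then some ((ni0, p.1), p.2) else none)
        = Option.map (fun (ni : Nat) => (((ni : Int), p.1), p.2)) none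
      rw [if_neg hne]
      rfl

theorem pvCand_eq4 (p : Int × String) : pvCand (4 : Int) p = pvCandG ["purchase","purchased","ordered","converted"] p := by
  rw [pvCand, pvCandG, pvHints, pvGroupOf]
  by_cases h0 : (["viewed","view","impression","seen"] : List String).contains (PySem.Str.lower p.2)
  · rw [if_pos h0]
    have hni : PySem.List.index? ["purchase","purchased","ordered","converted"] (PySem.Str.lower p.2) = none := by
      rw [PySem.List.index?_eq_none_iff]
      have hm : PySem.Str.lower p.2 ∈ (["viewed","view","impression","seen"] : List String) := by simpa using h0
      rcases (by simpa using hm : PySem.Str.lower p.2 = "viewed" ∨ PySem.Str.lower p.2 = "view" ∨ PySem.Str.lower p.2 = "impression" ∨ PySem.Str.lower p.2 = "seen") with h|h|h|h <;> rw [h] <;> decide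
    rw [hni]
    cases hi : PySem.List.index? (["viewed","view","impression","seen"] : List String) (PySem.Str.lower p.2) with
    | some ni => norm_num
    | none => rfl
  rw [if_neg h0, pvGroupOf]
  by_cases h1 : (["clicked","click","tap"] : List String).contains (PySem.Str.lower p.2)
  · rw [if_pos h1]
    have hni : PySem.List.index? ["purchase","purchased","ordered","converted"] (PySem.Str.lower p.2) = none := by
      rw [PySem.List.index?_eq_none_iff]
      have hm : PySem.Str.lower p.2 ∈ (["clicked","click","tap"] : List String) := by simpa using h1
      rcases (by simpa using hm : PySem.Str.lower p.2 = "clicked" ∨ PySem.Str.lower p.2 = "click" ∨ PySem.Str.lower p.2 = "tap") with h|h|h <;> rw [h] <;> decide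
    rw [hni]
    cases hi : PySem.List.index? (["clicked","click","tap"] : List String) (PySem.Str.lower p.2) with
    | some ni => norm_num
    | none => rfl
  rw [if_neg h1, pvGroupOf]
  by_cases h2 : (["add_to_cart","added_to_cart","atc"] : List String).contains (PySem.Str.lower p.2)
  · rw [if_pos h2]
    have hni : PySem.List.index? ["purchase","purchased","ordered","converted"] (PySem.Str.lower p.2) = none := by
      rw [PySem.List.index?_eq_none_iff]
      have hm : PySem.Str.lower p.2 ∈ (["add_to_cart","added_to_cart","atc"] : List String) := by simpa using h2
      rcases (by simpa using hm : PySem.Str.lower p.2 = "add_to_cart" ∨ PySem.Str.lower p.2 = "added_to_cart" ∨ PySem.Str.lower p.2 = "atc") with h|h|h <;> rw [h] <;> decide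
    rw [hni]
    cases hi : PySem.List.index? (["add_to_cart","added_to_cart","atc"] : List String) (PySem.Str.lower p.2) with
    | some ni => norm_num
    | none => rfl
  rw [if_neg h2, pvGroupOf]
  by_cases h3 : (["checkout","checked_out"] : List String).contains (PySem.Str.lower p.2)
  · rw [if_pos h3]
    have hni : PySem.List.index? ["purchase","purchased","ordered","converted"] (PySem.Str.lower p.2) = none := by
      rw [PySem.List.index?_eq_none_iff]
      have hm : PySem.Str.lower p.2 ∈ (["checkout","checked_out"] : List String) := by simpa using h3
      rcases (by simpa using hm : PySem.Str.lower p.2 = "checkout" ∨ PySem.Str.lower p.2 = "checked_out") with h|h <;> rw [h] <;> decide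
    rw [hni]
    cases hi : PySem.List.index? (["checkout","checked_out"] : List String) (PySem.Str.lower p.2) with
    | some ni => norm_num
    | none => rfl
  rw [if_neg h3, pvGroupOf]
  by_cases hK : (["purchase","purchased","ordered","converted"] : List String).contains (PySem.Str.lower p.2)
  · rw [if_pos hK]
    cases hi : PySem.List.index? (["purchase","purchased","ordered","converted"] : List String) (PySem.Str.lower p.2) with
    | some ni => norm_num
    | none => rfl
  · rw [if_neg hK]
    have hni : PySem.List.index? ["purchase","purchased","ordered","converted"] (PySem.Str.lower p.2) = none := by
      rw [PySem.List.index?_eq_none_iff]; simpa using hK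
    rw [hni]
    rfl

def pvSpecBest (g : List String) : List (Int × String) → Option ((Int × Int) × String)
  | [] => none
  | p :: ps => pvMerge (pvCandG g p) (pvSpecBest g ps)

theorem pvBestC_eq (gi : Int) (g : List String)
    (hc : ∀ p, pvCand gi p = pvCandG g p) : ∀ (ps : List (Int × String)),
    pvBestC gi ps = pvSpecBest g ps := by
  intro ps
  induction ps with
  | nil => rfl
  | cons p ps ih => rw [pvBestC, pvSpecBest, ih, hc]

-- first (index, column) with lower(column) = name
def pvFindIdx (n : String) : List String → Int → Option (Int × String)
  | [], _ => none
  | c :: cs, i0 =>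
      if PySem.Str.lower c = n then some (i0, c) else pvFindIdx n cs (i0 + 1)

theorem pvFindIdx_snd (n : String) : ∀ (cols : List String) (i0 : Int),
    Option.map (·.2) (pvFindIdx n cols i0) = cols.find? (fun c => PySem.Str.lower c == n) := by
  intro cols
  induction cols with
  | nil => intro i0; rfl
  | cons c cs ih =>
    intro i0
    rw [pvFindIdx, List.find?_cons]
    by_cases h : PySem.Str.lower c = n
    · simp [h]
    · have hb : (PySem.Str.lower c == n) = false := beq_eq_false_iff_ne.mpr h
      simp only [if_neg h, hb]
      exact ih (i0 + 1)

theorem pvCandG_bound (g : List String) (p : Int × String) (a : (Int × Int) × String)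
    (h : pvCandG g p = some a) : 0 ≤ a.1.1 ∧ a.1.2 = p.1 := by
  rw [pvCandG] at h
  cases hi : PySem.List.index? g (PySem.Str.lower p.2) with
  | some ni =>
    rw [hi, Option.map_some, Option.some_inj] at h
    subst h
    exact ⟨Int.natCast_nonneg ni, rfl⟩
  | none => rw [hi] at h; simp at h

theorem pvSpecBest_bound (g : List String) : ∀ (cols : List String) (i0 : Int) v,
    pvSpecBest g (PySem.List.enumerate cols i0) = some v → 0 ≤ v.1.1 ∧ i0 ≤ v.1.2 := by
  intro cols
  induction cols with
  | nil => intro i0 v h; rw [PySem.List.enumerate_nil] at h; exact absurd h (by rw [pvSpecBest]; simp)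
  | cons c cs ih =>
    intro i0 v h
    rw [PySem.List.enumerate_cons, pvSpecBest] at h
    cases hc : pvCandG g (i0, c) with
    | none =>
      rw [hc] at h
      have h' : pvSpecBest g (PySem.List.enumerate cs (i0 + 1)) = some v := h
      have := ih (i0 + 1) v h'
      exact ⟨this.1, by omega⟩
    | some a =>
      rw [hc] at h
      obtain ⟨ha1, ha2⟩ := pvCandG_bound g (i0, c) a hc
      cases hb : pvSpecBest g (PySem.List.enumerate cs (i0 + 1)) with
      | none =>
        rw [hb] at h
        have : a = v := by simpa [pvMerge] using h
        subst this
        exact ⟨ha1, by omega⟩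
      | some b =>
        rw [hb] at h
        obtain ⟨hb1, hb2⟩ := ih (i0 + 1) b hb
        by_cases hlt : pvKeyLt b.1 a.1
        · have : b = v := by simpa [pvMerge, hlt] using h
          subst this
          exact ⟨hb1, by omega⟩
        · have : a = v := by simpa [pvMerge, hlt] using h
          subst this
          exact ⟨ha1, by omega⟩

def pvShift (v : (Int × Int) × String) : (Int × Int) × String := ((v.1.1 + 1, v.1.2), v.2)

theorem pvMerge_shift (x y : Option ((Int × Int) × String)) :
    pvMerge (Option.map pvShift x) (Option.map pvShift y) = Option.map pvShift (pvMerge x y) := by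
  rcases x with _ | a <;> rcases y with _ | b <;>
    (simp only [Option.map, pvMerge, pvShift]; try rfl)
  have : pvKeyLt (b.1.1 + 1, b.1.2) (a.1.1 + 1, a.1.2) = pvKeyLt b.1 a.1 := by
    rw [Bool.eq_iff_iff]
    simp only [pvKeyLt, Bool.or_eq_true, Bool.and_eq_true, decide_eq_true_eq, beq_iff_eq]
    omega
  rw [this]
  split_ifs <;> rfl

theorem pvCandG_cons (n : String) (g : List String) (p : Int × String)
    (h : PySem.Str.lower p.2 ≠ n) :
    pvCandG (n :: g) p = Option.map pvShift (pvCandG g p) := by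
  rw [pvCandG, pvCandG, PySem.List.index?_cons_of_ne g (fun hh => h hh.symm)]
  cases PySem.List.index? g (PySem.Str.lower p.2) with
  | none => rfl
  | some k =>
    simp only [Option.map_some, Option.some_inj, pvShift]
    push_cast
    rfl

theorem pvSpecBest_cons (n : String) (g : List String) : ∀ (cols : List String) (i0 : Int),
    pvSpecBest (n :: g) (PySem.List.enumerate cols i0) =
      match pvFindIdx n cols i0 with
      | some (i, c) => some (((0 : Int), i), c)
      | none => Option.map pvShift (pvSpecBest g (PySem.List.enumerate cols i0)) := by
  intro cols
  induction cols with
  | nil => intro i0; rfl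
  | cons c cs ih =>
    intro i0
    rw [PySem.List.enumerate_cons, pvSpecBest, pvFindIdx]
    by_cases h : PySem.Str.lower c = n
    · rw [if_pos h]
      have hcand : pvCandG (n :: g) (i0, c) = some (((0 : Int), i0), c) := by
        rw [pvCandG]
        show (PySem.List.index? (n :: g) (PySem.Str.lower c)).map _ = _
        rw [h, PySem.List.index?_cons_self]
        rfl
      rw [hcand]
      cases hb : pvSpecBest (n :: g) (PySem.List.enumerate cs (i0 + 1)) with
      | none => rfl
      | some b =>
        obtain ⟨hb1, hb2⟩ := pvSpecBest_bound (n :: g) cs (i0 + 1) b hb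
        have hlt : pvKeyLt b.1 (((0 : Int), i0) : Int × Int) = false := by
          simp only [pvKeyLt, Bool.or_eq_false_iff, Bool.and_eq_false_iff,
            decide_eq_false_iff_not]
          omega
        show pvMerge (some (((0 : Int), i0), c)) (some b) = some (((0 : Int), i0), c)
        show (if pvKeyLt b.1 (((0 : Int), i0) : Int × Int) = true
            then some b else some (((0 : Int), i0), c)) = some (((0 : Int), i0), c)
        rw [hlt]
        simp
    · rw [if_neg h, pvCandG_cons n g (i0, c) h, ih (i0 + 1)]
      cases hf : pvFindIdx n cs (i0 + 1) with
      | some ic =>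
        obtain ⟨i, c'⟩ := ic
        cases hx : pvCandG g (i0, c) with
        | none => rfl
        | some a =>
          obtain ⟨ha1, ha2⟩ := pvCandG_bound g (i0, c) a hx
          have hlt : pvKeyLt (((0 : Int), i) : Int × Int) (pvShift a).1 = true := by
            simp only [pvShift, pvKeyLt, Bool.or_eq_true, Bool.and_eq_true, decide_eq_true_eq]
            omega
          show pvMerge (some (pvShift a)) (some (((0 : Int), i), c')) = some (((0 : Int), i), c')
          show (if pvKeyLt (((0 : Int), i) : Int × Int) (pvShift a).1 = true
              then some (((0 : Int), i), c') else some (pvShift a)) = some (((0 : Int), i), c')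
          rw [hlt]
          simp
      | none =>
        show pvMerge (Option.map pvShift (pvCandG g (i0, c)))
            (Option.map pvShift (pvSpecBest g (PySem.List.enumerate cs (i0 + 1))))
          = Option.map pvShift (pvSpecBest g (PySem.List.enumerate (c :: cs) i0))
        rw [pvMerge_shift, PySem.List.enumerate_cons, pvSpecBest]

theorem pvSpecBest_nilg : ∀ (ps : List (Int × String)), pvSpecBest [] ps = none := by
  intro ps
  induction ps with
  | nil => rfl
  | cons p ps ih => rw [pvSpecBest, ih]; rfl

theorem pvMap_snd_shift (o : Option ((Int × Int) × String)) :
    Option.map (·.2) (Option.map pvShift o) = Option.map (·.2) o := by cases o <;> rfl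

theorem pvSpecPick_eq (g : List String) : ∀ (cols : List String),
    Option.map (·.2) (pvSpecBest g (PySem.List.enumerate cols 0)) = pvSpecPick cols g := by
  induction g with
  | nil => intro cols; rw [pvSpecBest_nilg]; rfl
  | cons n g ih =>
    intro cols
    rw [pvSpecBest_cons, pvSpecPick, ← pvFindIdx_snd n cols 0]
    cases hf : pvFindIdx n cols 0 with
    | some ic => obtain ⟨i, c⟩ := ic; rfl
    | none => dsimp only; rw [pvMap_snd_shift, ih]; rfl

theorem pvFold_pairs (cols : List String) (bestD : PySem.Dict Int ((Int × Int) × String))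
    (hget : ∀ gi, PySem.Dict.get? bestD gi = pvBestC gi (PySem.List.enumerate cols 0)) :
    ∀ (pairs : List (Int × List String)),
    (∀ q ∈ pairs, ∀ p, pvCand q.1 p = pvCandG q.2 p) →
    ∀ acc : List String,
    (pairs.map (·.1)).foldl (fun acc gi =>
        match PySem.Dict.get? bestD gi with
        | some v => acc ++ [v.2]
        | none => acc) acc
    = (pairs.map (·.2)).foldl (fun ord group =>
        match pvSpecPick cols group with
        | some c => ord ++ [c]
        | none => ord) acc := by
  intro pairs
  induction pairs with
  | nil => intro _ acc; rfl
  | cons q qs ih =>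
    intro hq acc
    simp only [List.map_cons, List.foldl_cons]
    have hstep : (match PySem.Dict.get? bestD q.1 with
        | some v => acc ++ [v.2]
        | none => acc)
      = (match pvSpecPick cols q.2 with
        | some c => acc ++ [c]
        | none => acc) := by
      rw [hget, pvBestC_eq q.1 q.2 (hq q List.mem_cons_self), ← pvSpecPick_eq q.2 cols]
      cases pvSpecBest q.2 (PySem.List.enumerate cols 0) <;> rfl
    rw [hstep]
    exact ih (fun q' hq' => hq q' (List.mem_cons_of_mem _ hq')) _

-- ===== VERDICT (by name: the statement is the Claim_ definition above) =====
theorem order_steps_py_spec : Claim_equal_order_steps_py := by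
  intro cols _
  show order_steps_py cols = order_steps_py_alt cols
  rw [order_steps_py, order_steps_py_alt]
  obtain ⟨h1, h2⟩ := pvFold_spec cols pvHints [] PySem.Set.empty
    (by intro a; constructor <;> (intro h; simp [PySem.Set.empty] at h))
    (by intro a ha; simp at ha) (by decide)
  have hget : ∀ gi : Int,
      PySem.Dict.get? ((PySem.List.enumerate cols 0).foldl pvStep PySem.Dict.empty) gi
        = pvBestC gi (PySem.List.enumerate cols 0) := by
    intro gi
    rw [pvFoldB_get gi (PySem.List.enumerate cols 0) PySem.Dict.empty, PySem.Dict.get?_empty]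
    rfl
  have hchosen := pvFold_pairs cols _ hget
    [(0, ["viewed","view","impression","seen"]),
     (1, ["clicked","click","tap"]),
     (2, ["add_to_cart","added_to_cart","atc"]),
     (3, ["checkout","checked_out"]),
     (4, ["purchase","purchased","ordered","converted"])]
    (by
      intro q hq p
      simp only [List.mem_cons, List.not_mem_nil, or_false] at hq
      rcases hq with rfl | rfl | rfl | rfl | rfl
      · exact pvCand_eq0 p
      · exact pvCand_eq1 p
      · exact pvCand_eq2 p
      · exact pvCand_eq3 p
      · exact pvCand_eq4 p) []
  have hma : ([(0, ["viewed","view","impression","seen"]),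
     (1, ["clicked","click","tap"]),
     (2, ["add_to_cart","added_to_cart","atc"]),
     (3, ["checkout","checked_out"]),
     (4, ["purchase","purchased","ordered","converted"])].map
       (fun q : Int × List String => q.1)) = PySem.List.pyRange 0 (pvHints.length : Int) 1 := by rfl
  have hmb : ([(0, ["viewed","view","impression","seen"]),
     (1, ["clicked","click","tap"]),
     (2, ["add_to_cart","added_to_cart","atc"]),
     (3, ["checkout","checked_out"]),
     (4, ["purchase","purchased","ordered","converted"])].map
       (fun q : Int × List String => q.2)) = pvHints := by rfl
  rw [hma, hmb] at hchosen
  rw [h1, ← hchosen]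
  -- the A-side leftover loop is 'append the sorted columns not assigned'
  rw [PySem.List.foldl_append_if
    (fun c => !(PySem.Set.contains
      (pvHints.foldl (fun st group => pvGroupA cols group st) ([], PySem.Set.empty)).2 c))
    (fun c => c)]
  have hcont : (fun c => !(PySem.Set.contains
      (pvHints.foldl (fun st group => pvGroupA cols group st) ([], PySem.Set.empty)).2 c))
    = (fun c => !(PySem.Set.contains (PySem.Set.ofList
      ((PySem.List.pyRange 0 (pvHints.length : Int) 1).foldl (fun acc gi =>
        match PySem.Dict.get? ((PySem.List.enumerate cols 0).foldl pvStep PySem.Dict.empty) gi with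
        | some v => acc ++ [v.2]
        | none => acc) [])) c)) := by
    funext c
    have : PySem.Set.contains
        (pvHints.foldl (fun st group => pvGroupA cols group st) ([], PySem.Set.empty)).2 c
      = PySem.Set.contains (PySem.Set.ofList
        ((PySem.List.pyRange 0 (pvHints.length : Int) 1).foldl (fun acc gi =>
          match PySem.Dict.get? ((PySem.List.enumerate cols 0).foldl pvStep PySem.Dict.empty) gi with
          | some v => acc ++ [v.2]
          | none => acc) [])) c := by
      rw [Bool.eq_iff_iff, PySem.Set.contains_iff, PySem.Set.contains_iff, PySem.Set.mem_ofList,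
        hchosen]
      exact h2 c
    rw [this]
  rw [hcont]
  simp
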